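-- pv_equiv track=rewrite | github.com/Jianming-Guo/NIHF | 01quary_run_allgroupsv3.2.py | find_first_token_match
-- ===== SOURCE A (Python) =====
-- def token_initial(token):
--     return token[0] if token else ""
--
-- def find_first_token_match(tokens, first_family):
--     if not tokens:
--         return None, None
--     initials = set([token_initial(x) for x in first_family if x])
--
--     for t in tokens:
--         if t in first_family:
--             return t, "family_full"
--
--     for t in tokens:
--         if len(t) == 1 and t in initials:
--             return t, "initial"
--
--     return None, None
-- ===== SOURCE B (Python) =====
-- def find_first_token_match(tokens, first_family):
--     family = set(first_family)
--     initials = {f[0] for f in first_family if f}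
--     first_initial = None
--     for t in tokens:
--         if t in family:
--             return t, "family_full"
--         if first_initial is None and len(t) == 1 and t in initials:
--             first_initial = t
--     if first_initial is not None:
--         return first_initial, "initial"
--     return None, None
-- ===== Notes on version B (the rewrite author's own statement) =====
-- stated objective: simpler
-- what changed: Replaced A's two sequential scans of tokens (full-family pass, then initial pass) by a single pass that returns eagerly on a full family match and records only the first single-letter initial match in one variable, resolved after the loop.
import Mathlib
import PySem

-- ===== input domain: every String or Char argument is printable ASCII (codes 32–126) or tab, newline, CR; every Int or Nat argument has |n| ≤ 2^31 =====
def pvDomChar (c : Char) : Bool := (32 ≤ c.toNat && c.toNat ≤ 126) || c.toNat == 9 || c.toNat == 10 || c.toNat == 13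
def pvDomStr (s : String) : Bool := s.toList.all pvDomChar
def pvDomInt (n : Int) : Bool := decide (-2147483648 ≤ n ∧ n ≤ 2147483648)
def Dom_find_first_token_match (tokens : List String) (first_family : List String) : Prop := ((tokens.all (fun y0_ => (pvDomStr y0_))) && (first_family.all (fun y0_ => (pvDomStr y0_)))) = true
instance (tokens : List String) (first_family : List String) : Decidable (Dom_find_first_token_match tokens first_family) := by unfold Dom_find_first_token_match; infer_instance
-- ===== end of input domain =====

-- B does one pass over tokens (eager return on a full family match, first initial match
-- recorded in a variable) instead of A's two sequential passes; objective: simpler.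

-- ===== PORT A =====
-- token[0] if token else ""
def token_initial (token : String) : String :=
  match token.toList with
  | [] => ""
  | c :: _ => String.mk [c]

-- first loop: first t with t in first_family (list membership)
def ffLoop1 (tokens first_family : List String) : Option String :=
  match tokens with
  | [] => none
  | t :: rest => if first_family.contains t then some t else ffLoop1 rest first_family

-- second loop: first t with len(t) == 1 and t in initials (set membership)
def ffLoop2 (tokens : List String) (initials : PySem.Set String) : Option String :=
  match tokens with
  | [] => none
  | t :: rest =>
    if t.toList.length == 1 && PySem.Set.contains initials t then some t
    else ffLoop2 rest initials

def find_first_token_match (tokens : List String) (first_family : List String) : Option String × Option String :=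
  match tokens with
  | [] => (none, none)
  | _ :: _ =>
    let initials : PySem.Set String :=
      PySem.Set.ofList ((first_family.filter (fun x => !(x == ""))).map token_initial)
    match ffLoop1 tokens first_family with
    | some t => (some t, some "family_full")
    | none =>
      match ffLoop2 tokens initials with
      | some t => (some t, some "initial")
      | none => (none, none)

-- ===== PORT B =====
-- f[0] (only applied to nonempty f in the comprehension)
def bInitial (f : String) : String := String.mk (f.toList.take 1)

-- the single for-loop of Source B, carrying first_initial
def altLoop (tokens : List String) (family : PySem.Set String) (initials : PySem.Set String)
    (firstInitial : Option String) : Option String × Option String :=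
  match tokens with
  | [] =>
    match firstInitial with
    | some i => (some i, some "initial")
    | none => (none, none)
  | t :: rest =>
    if PySem.Set.contains family t then (some t, some "family_full")
    else if firstInitial.isNone && t.toList.length == 1 && PySem.Set.contains initials t then
      altLoop rest family initials (some t)
    else altLoop rest family initials firstInitial

def find_first_token_match_alt (tokens : List String) (first_family : List String) : Option String × Option String :=
  let family : PySem.Set String := PySem.Set.ofList first_family
  let initials : PySem.Set String :=
    PySem.Set.ofList ((first_family.filter (fun f => !(f == ""))).map bInitial)
  altLoop tokens family initials none

-- ===== PRECONDITION & SPEC =====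
def Spec_find_first_token_match (tokens : List String) (first_family : List String) (out : Option String × Option String) : Prop := out = find_first_token_match_alt tokens first_family
instance (tokens : List String) (first_family : List String) (out : Option String × Option String) : Decidable (Spec_find_first_token_match tokens first_family out) := by unfold Spec_find_first_token_match; infer_instance

-- ===== CLAIM (what is proved, stated in full; the proofs are below) =====
def Claim_equal_find_first_token_match : Prop := ∀ (tokens : List String) (first_family : List String), Dom_find_first_token_match tokens first_family → Spec_find_first_token_match tokens first_family (find_first_token_match tokens first_family)

-- ===== LEMMAS AND PROOFS =====

-- A's and B's initial helpers agree on nonempty strings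
theorem initial_agree (f : String) (h : f ≠ "") : token_initial f = bInitial f := by
  cases hf : f.toList with
  | nil => exact absurd (String.toList_eq_nil_iff.mp hf) h
  | cons c cs => simp [token_initial, bInitial, hf]

-- hence the two "initials" lists coincide
theorem initials_eq (ff : List String) :
    (ff.filter (fun x => !(x == ""))).map token_initial
      = (ff.filter (fun f => !(f == ""))).map bInitial := by
  apply List.map_congr_left
  intro f hf
  have : f ≠ "" := by
    have := (List.mem_filter.mp hf).2
    simpa using this
  exact initial_agree f this

-- once an initial is recorded, only a later full family match can change the answer
theorem altLoop_some (tokens ff : List String) (I : PySem.Set String) (i : String) :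
    altLoop tokens (PySem.Set.ofList ff) I (some i)
      = match ffLoop1 tokens ff with
        | some t => (some t, some "family_full")
        | none => (some i, some "initial") := by
  induction tokens with
  | nil => simp [altLoop, ffLoop1]
  | cons t rest ih =>
    by_cases h : t ∈ ff
    · simp [altLoop, ffLoop1, h]
    · simp [altLoop, ffLoop1, h, ih]

-- the one-pass loop computes exactly A's two-pass result
theorem altLoop_none (tokens ff : List String) (I : PySem.Set String) :
    altLoop tokens (PySem.Set.ofList ff) I none
      = match ffLoop1 tokens ff with
        | some t => (some t, some "family_full")
        | none =>
          match ffLoop2 tokens I with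
          | some t => (some t, some "initial")
          | none => (none, none) := by
  induction tokens with
  | nil => simp [altLoop, ffLoop1, ffLoop2]
  | cons t rest ih =>
    by_cases h : t ∈ ff
    · simp [altLoop, ffLoop1, h]
    · by_cases h2 : t.length = 1 ∧ t ∈ I
      · simp [altLoop, ffLoop1, ffLoop2, h, h2, altLoop_some]
      · simp [altLoop, ffLoop1, ffLoop2, h, h2, ih]

-- ===== VERDICT (by name: the statement is the Claim_ definition above) =====
theorem find_first_token_match_spec : Claim_equal_find_first_token_match := by
  intro tokens ff _
  unfold Spec_find_first_token_match find_first_token_match find_first_token_match_alt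
  cases tokens with
  | nil => simp [altLoop]
  | cons t rest =>
    rw [altLoop_none, initials_eq]
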